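-- pv_equiv track=rewrite | github.com/CatchMan1/AI-education-generative-recommendation | Baseline/direct_rec.py | f_mat
-- ===== SOURCE A (Python) =====
-- def f_mat(history, candidate_item, item_keywords_pos, item_keywords_neg):
--     # Keyword matching model
--     pos_hist = [i for i, fb in history if fb == 1] # Ipos
--     neg_hist = [i for i, fb in history if fb == 0] # Ineg
--     Dpos_c = item_keywords_pos.get(candidate_item, set())
--     Dneg_c = item_keywords_neg.get(candidate_item, set())
--     alpha_pos = sum(len(Dpos_c & item_keywords_pos.get(i, set())) for i in pos_hist)
--     alpha_neg = sum(len(Dneg_c & item_keywords_neg.get(i, set())) for i in neg_hist)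
--     return alpha_pos - alpha_neg  # 返回差值作为分数
-- ===== SOURCE B (Python) =====
-- def f_mat(history, candidate_item, item_keywords_pos, item_keywords_neg):
--     # Inverted index: count, per keyword, how many liked / disliked history items contain it,
--     # then score the candidate's keywords against those counters.
--     pos_cnt = {}
--     neg_cnt = {}
--     for i, fb in history:
--         if fb == 1:
--             for k in item_keywords_pos.get(i, ()):
--                 pos_cnt[k] = pos_cnt.get(k, 0) + 1
--         elif fb == 0:
--             for k in item_keywords_neg.get(i, ()):
--                 neg_cnt[k] = neg_cnt.get(k, 0) + 1
--     alpha_pos = sum(pos_cnt.get(k, 0) for k in item_keywords_pos.get(candidate_item, ()))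
--     alpha_neg = sum(neg_cnt.get(k, 0) for k in item_keywords_neg.get(candidate_item, ()))
--     return alpha_pos - alpha_neg
-- ===== Notes on version B (the rewrite author's own statement) =====
-- stated objective: alternative
-- what changed: Replaces the per-history-item set intersections with an inverted keyword->frequency table built in one pass over the history, then a single pass over the candidate's keywords summing the counters.
import Mathlib
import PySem

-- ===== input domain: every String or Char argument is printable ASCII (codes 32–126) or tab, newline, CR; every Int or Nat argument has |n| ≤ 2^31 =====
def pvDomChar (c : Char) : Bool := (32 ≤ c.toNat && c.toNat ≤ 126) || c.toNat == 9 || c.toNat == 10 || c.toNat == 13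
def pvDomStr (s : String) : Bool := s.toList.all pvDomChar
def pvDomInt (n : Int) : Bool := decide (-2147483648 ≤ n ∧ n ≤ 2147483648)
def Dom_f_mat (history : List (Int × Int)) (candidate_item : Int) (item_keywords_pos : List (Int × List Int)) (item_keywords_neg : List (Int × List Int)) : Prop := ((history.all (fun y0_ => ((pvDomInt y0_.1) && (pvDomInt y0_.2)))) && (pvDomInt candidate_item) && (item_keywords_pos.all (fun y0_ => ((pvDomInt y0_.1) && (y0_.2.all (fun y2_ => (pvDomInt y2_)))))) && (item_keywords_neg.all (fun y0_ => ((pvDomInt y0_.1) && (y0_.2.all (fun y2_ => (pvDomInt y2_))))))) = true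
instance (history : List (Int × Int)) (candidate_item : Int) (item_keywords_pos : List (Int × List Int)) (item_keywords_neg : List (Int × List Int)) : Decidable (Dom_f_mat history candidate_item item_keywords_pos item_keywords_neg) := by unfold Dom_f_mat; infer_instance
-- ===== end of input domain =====

-- B replaces per-history-item set intersections with an inverted keyword->frequency table
-- built in one pass over the history, then one pass over the candidate's keywords (alternative).

-- shared primitive: Python's dict.get(i, <empty>) on the association list (first match)
def kwGet (d : List (Int × List Int)) (i : Int) : List Int :=
  ((d.find? (fun p => p.1 == i)).map Prod.snd).getD []

-- ===== PORT A =====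
def f_mat (history : List (Int × Int)) (candidate_item : Int) (item_keywords_pos : List (Int × List Int)) (item_keywords_neg : List (Int × List Int)) : Int :=
  let pos_hist := (history.filter (fun p => p.2 == 1)).map Prod.fst
  let neg_hist := (history.filter (fun p => p.2 == 0)).map Prod.fst
  let Dpos_c := kwGet item_keywords_pos candidate_item
  let Dneg_c := kwGet item_keywords_neg candidate_item
  let alpha_pos := (pos_hist.map (fun i => ((Dpos_c.filter (fun k => (kwGet item_keywords_pos i).contains k)).length : Int))).sum
  let alpha_neg := (neg_hist.map (fun i => ((Dneg_c.filter (fun k => (kwGet item_keywords_neg i).contains k)).length : Int))).sum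
  alpha_pos - alpha_neg

-- ===== PORT B =====
def f_mat_alt (history : List (Int × Int)) (candidate_item : Int) (item_keywords_pos : List (Int × List Int)) (item_keywords_neg : List (Int × List Int)) : Int :=
  let cnts := history.foldl
    (fun (cs : PySem.Dict Int Int × PySem.Dict Int Int) p =>
      if p.2 == 1 then
        ((kwGet item_keywords_pos p.1).foldl (fun d k => d.insert k (d.getD k 0 + 1)) cs.1, cs.2)
      else if p.2 == 0 then
        (cs.1, (kwGet item_keywords_neg p.1).foldl (fun d k => d.insert k (d.getD k 0 + 1)) cs.2)
      else cs)
    (PySem.Dict.empty, PySem.Dict.empty)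
  let alpha_pos := ((kwGet item_keywords_pos candidate_item).map (fun k => cnts.1.getD k 0)).sum
  let alpha_neg := ((kwGet item_keywords_neg candidate_item).map (fun k => cnts.2.getD k 0)).sum
  alpha_pos - alpha_neg

-- ===== PRECONDITION & SPEC =====
-- Pre_ only states the set-representation invariant of the type convention: every dict value
-- is a Python set, so its List Int encoding holds distinct elements. No Python input is excluded.
def Pre_f_mat (history : List (Int × Int)) (candidate_item : Int) (item_keywords_pos : List (Int × List Int)) (item_keywords_neg : List (Int × List Int)) : Prop :=
  (∀ p ∈ item_keywords_pos, p.2.Nodup) ∧ (∀ p ∈ item_keywords_neg, p.2.Nodup)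
instance (history : List (Int × Int)) (candidate_item : Int) (item_keywords_pos : List (Int × List Int)) (item_keywords_neg : List (Int × List Int)) : Decidable (Pre_f_mat history candidate_item item_keywords_pos item_keywords_neg) := by unfold Pre_f_mat; infer_instance
def pvWitness_f_mat : (List (Int × Int)) × Int × (List (Int × List Int)) × (List (Int × List Int)) :=
  ([(1, 1), (2, 0), (3, 1)], 4, [(1, [5, 6]), (3, [6]), (4, [6, 7])], [(2, [5]), (4, [5, 8])])
def Spec_f_mat (history : List (Int × Int)) (candidate_item : Int) (item_keywords_pos : List (Int × List Int)) (item_keywords_neg : List (Int × List Int)) (out : Int) : Prop := out = f_mat_alt history candidate_item item_keywords_pos item_keywords_neg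
instance (history : List (Int × Int)) (candidate_item : Int) (item_keywords_pos : List (Int × List Int)) (item_keywords_neg : List (Int × List Int)) (out : Int) : Decidable (Spec_f_mat history candidate_item item_keywords_pos item_keywords_neg out) := by unfold Spec_f_mat; infer_instance

-- ===== CLAIM (what is proved, stated in full; the proofs are below) =====
def Claim_equal_f_mat : Prop := ∀ (history : List (Int × Int)) (candidate_item : Int) (item_keywords_pos : List (Int × List Int)) (item_keywords_neg : List (Int × List Int)), Dom_f_mat history candidate_item item_keywords_pos item_keywords_neg → Pre_f_mat history candidate_item item_keywords_pos item_keywords_neg → Spec_f_mat history candidate_item item_keywords_pos item_keywords_neg (f_mat history candidate_item item_keywords_pos item_keywords_neg)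

-- ===== LEMMAS AND PROOFS =====

-- step of one value-list into a counter
def bump (d : PySem.Dict Int Int) (l : List Int) : PySem.Dict Int Int :=
  l.foldl (fun d k => d.insert k (d.getD k 0 + 1)) d

-- the pair fold splits into two independent folds over the filtered history
lemma pairFold (kp kn : List (Int × List Int)) (hist : List (Int × Int))
    (a b : PySem.Dict Int Int) :
    hist.foldl
      (fun (cs : PySem.Dict Int Int × PySem.Dict Int Int) p =>
        if p.2 == 1 then
          ((kwGet kp p.1).foldl (fun d k => d.insert k (d.getD k 0 + 1)) cs.1, cs.2)
        else if p.2 == 0 then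
          (cs.1, (kwGet kn p.1).foldl (fun d k => d.insert k (d.getD k 0 + 1)) cs.2)
        else cs) (a, b)
    = ((hist.filter (fun p => p.2 == 1)).foldl (fun d p => bump d (kwGet kp p.1)) a,
       (hist.filter (fun p => p.2 == 0)).foldl (fun d p => bump d (kwGet kn p.1)) b) := by
  induction hist generalizing a b with
  | nil => rfl
  | cons p t ih =>
    simp only [List.foldl_cons, List.filter_cons]
    by_cases h1 : p.2 = 1
    · have e1 : (p.2 == 1) = true := by simp [h1]
      have e0 : (p.2 == 0) = false := by simp [h1]
      simp only [e1, e0, if_true, Bool.false_eq_true, if_false, List.foldl_cons]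
      exact ih _ b
    · by_cases h0 : p.2 = 0
      · have e1 : (p.2 == 1) = false := by simp [h1]
        have e0 : (p.2 == 0) = true := by simp [h0]
        simp only [e1, e0, if_true, Bool.false_eq_true, if_false, List.foldl_cons]
        exact ih a _
      · have e1 : (p.2 == 1) = false := by simp [h1]
        have e0 : (p.2 == 0) = false := by simp [h0]
        simp only [e1, e0, Bool.false_eq_true, if_false]
        exact ih a b

-- counter value after folding a list of value-lists
lemma cntVal (f : Int × Int → List Int) (L : List (Int × Int)) (d : PySem.Dict Int Int) (k : Int) :
    (L.foldl (fun d p => bump d (f p)) d).getD k 0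
      = d.getD k 0 + (L.map (fun p => ((f p).count k : Int))).sum := by
  induction L generalizing d with
  | nil => simp
  | cons p t ih =>
    rw [List.foldl_cons, ih, List.map_cons, List.sum_cons]
    unfold bump
    rw [PySem.Dict.getD_foldl_insert_add_one]
    ring

lemma sum_map_add (L : List α) (f g : α → Int) :
    (L.map (fun x => f x + g x)).sum = (L.map f).sum + (L.map g).sum := by
  induction L with
  | nil => simp
  | cons x t ih => simp [ih]; ring

-- exchange the double sum
lemma sum_swap (D : List Int) (L : List (Int × Int)) (f : Int × Int → Int → Int) :
    (D.map (fun k => (L.map (fun p => f p k)).sum)).sum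
      = (L.map (fun p => (D.map (fun k => f p k)).sum)).sum := by
  induction D with
  | nil => simp
  | cons k t ih =>
    simp only [List.map_cons, List.sum_cons, ih, ← sum_map_add]

-- with a duplicate-free S, the counts over D sum to the intersection size
lemma sum_count_eq_inter (D S : List Int) (hS : S.Nodup) :
    (D.map (fun k => ((S.count k : Int)))).sum
      = ((D.filter (fun k => S.contains k)).length : Int) := by
  induction D with
  | nil => simp
  | cons k t ih =>
    simp only [List.map_cons, List.sum_cons, List.filter_cons, ih]
    by_cases hm : k ∈ S
    · rw [List.count_eq_one_of_mem hS hm]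
      simp [hm]
      omega
    · rw [List.count_eq_zero_of_not_mem hm]
      simp [hm]

-- one side of the score: B's counter pass equals A's intersection pass
lemma side_eq (kd : List (Int × List Int)) (hnd : ∀ p ∈ kd, p.2.Nodup)
    (D : List Int) (L : List (Int × Int)) :
    (D.map (fun k => (L.foldl (fun d p => bump d (kwGet kd p.1)) PySem.Dict.empty).getD k 0)).sum
      = ((L.map Prod.fst).map (fun i => ((D.filter (fun k => (kwGet kd i).contains k)).length : Int))).sum := by
  have hget : ∀ i, (kwGet kd i).Nodup := by
    intro i
    unfold kwGet
    cases hf : kd.find? (fun p => p.1 == i) with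
    | none => simp
    | some p => simpa using hnd p (List.mem_of_find?_eq_some hf)
  calc (D.map (fun k => (L.foldl (fun d p => bump d (kwGet kd p.1)) PySem.Dict.empty).getD k 0)).sum
      = (D.map (fun k => (L.map (fun p => ((kwGet kd p.1).count k : Int))).sum)).sum := by
        simp [cntVal (fun p => kwGet kd p.1) L PySem.Dict.empty]
    _ = (L.map (fun p => (D.map (fun k => ((kwGet kd p.1).count k : Int))).sum)).sum := by
        exact sum_swap D L (fun p k => ((kwGet kd p.1).count k : Int))
    _ = (L.map (fun p => ((D.filter (fun k => (kwGet kd p.1).contains k)).length : Int))).sum := by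
        congr 1
        apply List.map_congr_left
        intro p _
        exact sum_count_eq_inter D (kwGet kd p.1) (hget p.1)
    _ = ((L.map Prod.fst).map (fun i => ((D.filter (fun k => (kwGet kd i).contains k)).length : Int))).sum := by
        rw [List.map_map]
        rfl

-- ===== VERDICT (by name: the statement is the Claim_ definition above) =====
theorem f_mat_spec : Claim_equal_f_mat := by
  intro history c kp kn _ hpre
  unfold Spec_f_mat f_mat f_mat_alt
  rw [pairFold]
  simp only
  rw [side_eq kp hpre.1 (kwGet kp c) (history.filter (fun p => p.2 == 1)),
      side_eq kn hpre.2 (kwGet kn c) (history.filter (fun p => p.2 == 0))]
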